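-- pv_equiv track=rewrite | github.com/chenkianwee/py4design_examples | example_scripts/model_princeton3d/sort_daysim_solar.py | sort_monthly
-- ===== SOURCE A (Python) =====
-- def sort_monthly(annual_hr_list):
--     annual = []
--     for i in range(12):
--         if i == 0:
--             mthly = annual_hr_list[0:744]
--         elif i ==1:
--             mthly = annual_hr_list[744:1416]
--         elif i ==2:
--             mthly = annual_hr_list[1416:2160]
--         elif i ==3:
--             mthly = annual_hr_list[2160:2880]
--         elif i ==4:
--             mthly = annual_hr_list[2880:3624]
--         elif i ==5:
--             mthly = annual_hr_list[3624:4344]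
--         elif i ==6:
--             mthly = annual_hr_list[4344:5088]
--         elif i ==7:
--             mthly = annual_hr_list[5088:5832]
--         elif i ==8:
--             mthly = annual_hr_list[5832:6552]
--         elif i ==9:
--             mthly = annual_hr_list[6552:7296]
--         elif i ==10:
--             mthly = annual_hr_list[7296:8016]
--         elif i ==11:
--             mthly = annual_hr_list[8016:8760]
--         annual.append(mthly)
--     return annual
-- ===== SOURCE B (Python) =====
-- def sort_monthly(annual_hr_list):
--     lengths = [d * 24 for d in (31, 28, 31, 30, 31, 30, 31, 31, 30, 31, 30, 31)]
--     annual = [[] for _ in range(12)]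
--     m = 0
--     rem = lengths[0]
--     for x in annual_hr_list:
--         if m == 12:
--             break
--         annual[m].append(x)
--         rem -= 1
--         if rem == 0:
--             m += 1
--             if m < 12:
--                 rem = lengths[m]
--     return annual
-- ===== Notes on version B (the rewrite author's own statement) =====
-- stated objective: alternative
-- what changed: Instead of taking 12 precomputed slices of the input, B makes a single element-wise pass that deals each hour into one of 12 pre-allocated month buckets, advancing a month pointer when a countdown of the current month's remaining hours hits zero.
import Mathlib
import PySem

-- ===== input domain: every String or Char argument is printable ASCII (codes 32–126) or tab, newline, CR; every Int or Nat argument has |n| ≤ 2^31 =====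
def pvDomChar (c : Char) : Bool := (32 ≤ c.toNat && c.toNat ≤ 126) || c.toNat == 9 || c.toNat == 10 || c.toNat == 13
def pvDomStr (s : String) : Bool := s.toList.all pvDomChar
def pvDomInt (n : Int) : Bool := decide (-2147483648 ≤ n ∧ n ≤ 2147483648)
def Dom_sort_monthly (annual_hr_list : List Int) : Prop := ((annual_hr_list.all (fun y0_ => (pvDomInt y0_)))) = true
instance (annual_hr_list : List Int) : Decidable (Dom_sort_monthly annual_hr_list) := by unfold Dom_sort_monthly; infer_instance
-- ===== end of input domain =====

-- B replaces A's 12 fixed-boundary slices by a single element-wise pass that deals each hour into month buckets via a countdown counter (alternative algorithm, same O(n)).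


-- ===== PORT A =====
def sort_monthly (annual_hr_list : List Int) : List (List Int) :=
  (PySem.List.pyRange 0 12 1).foldl (fun annual i =>
    let mthly :=
      if i == 0 then PySem.List.slice annual_hr_list (some 0) (some 744)
      else if i == 1 then PySem.List.slice annual_hr_list (some 744) (some 1416)
      else if i == 2 then PySem.List.slice annual_hr_list (some 1416) (some 2160)
      else if i == 3 then PySem.List.slice annual_hr_list (some 2160) (some 2880)
      else if i == 4 then PySem.List.slice annual_hr_list (some 2880) (some 3624)
      else if i == 5 then PySem.List.slice annual_hr_list (some 3624) (some 4344)
      else if i == 6 then PySem.List.slice annual_hr_list (some 4344) (some 5088)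
      else if i == 7 then PySem.List.slice annual_hr_list (some 5088) (some 5832)
      else if i == 8 then PySem.List.slice annual_hr_list (some 5832) (some 6552)
      else if i == 9 then PySem.List.slice annual_hr_list (some 6552) (some 7296)
      else if i == 10 then PySem.List.slice annual_hr_list (some 7296) (some 8016)
      else PySem.List.slice annual_hr_list (some 8016) (some 8760)
    annual ++ [mthly]) []

-- ===== PORT B =====
-- month lengths in hours, as in Source B
def pvLens : List Int := ([31, 28, 31, 30, 31, 30, 31, 31, 30, 31, 30, 31] : List Int).map (· * 24)

-- one loop iteration of Source B: state = (m, rem, annual)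
def pvStep (st : Nat × Int × List (List Int)) (x : Int) : Nat × Int × List (List Int) :=
  if st.1 = 12 then st
  else
    let annual' := st.2.2.set st.1 (st.2.2.getD st.1 [] ++ [x])
    let rem' := st.2.1 - 1
    if rem' = 0 then
      if st.1 + 1 < 12 then (st.1 + 1, pvLens.getD (st.1 + 1) 0, annual')
      else (st.1 + 1, rem', annual')
    else (st.1, rem', annual')

def sort_monthly_alt (annual_hr_list : List Int) : List (List Int) :=
  (annual_hr_list.foldl pvStep (0, pvLens.getD 0 0, List.replicate 12 [])).2.2

-- ===== PRECONDITION & SPEC =====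
def Spec_sort_monthly (annual_hr_list : List Int) (out : List (List Int)) : Prop := out = sort_monthly_alt annual_hr_list
instance (annual_hr_list : List Int) (out : List (List Int)) : Decidable (Spec_sort_monthly annual_hr_list out) := by unfold Spec_sort_monthly; infer_instance

-- ===== CLAIM (what is proved, stated in full; the proofs are below) =====
def Claim_equal_sort_monthly : Prop := ∀ (annual_hr_list : List Int), Dom_sort_monthly annual_hr_list → Spec_sort_monthly annual_hr_list (sort_monthly annual_hr_list)

-- ===== LEMMAS AND PROOFS =====

-- once m = 12, the fold is the identity
theorem pvStep_stuck (l : List Int) (r : Int) (acc : List (List Int)) :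
    l.foldl pvStep (12, r, acc) = (12, r, acc) := by
  induction l with
  | nil => rfl
  | cons x t ih => simpa [pvStep] using ih

-- filling month j (j+1 < 12) with capacity n+1 consumes (up to) n+1 elements into bucket j
theorem pvFill (j n : Nat) (l : List Int) (acc : List (List Int))
    (hj : j + 1 < 12) (hja : j < acc.length) :
    (l.foldl pvStep (j, ((n : Int) + 1), acc)).2.2 =
      ((l.drop (n + 1)).foldl pvStep
        (j + 1, pvLens.getD (j + 1) 0,
          acc.set j (acc.getD j [] ++ l.take (n + 1)))).2.2 := by
  induction n generalizing l acc with
  | zero =>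
    cases l with
    | nil =>
      simp [List.getD_eq_getElem?_getD, List.getElem?_eq_getElem hja]
    | cons x t =>
      simp [pvStep, show j ≠ 12 by omega, hj]
  | succ n ih =>
    cases l with
    | nil =>
      simp [List.getD_eq_getElem?_getD, List.getElem?_eq_getElem hja]
    | cons x t =>
      have h1 : ((n : Int) + 1 + 1) - 1 ≠ 0 := by omega
      have hja' : j < (acc.set j (acc.getD j [] ++ [x])).length := by simpa using hja
      have hstep : pvStep (j, ((n + 1 : Nat) : Int) + 1, acc) x
          = (j, ((n : Nat) : Int) + 1, acc.set j (acc.getD j [] ++ [x])) := by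
        simp only [pvStep, show j ≠ 12 by omega]
        push_cast
        norm_num
        intro h
        exact absurd h (by omega)
      rw [List.foldl_cons, hstep, ih t (acc.set j (acc.getD j [] ++ [x])) hja']
      simp [List.set_set, List.getD_eq_getElem?_getD, hja, List.append_assoc]

-- filling the last month: everything after its capacity is ignored
theorem pvFillLast (n : Nat) (l : List Int) (acc : List (List Int))
    (hja : 11 < acc.length) :
    (l.foldl pvStep (11, ((n : Int) + 1), acc)).2.2 =
      acc.set 11 (acc.getD 11 [] ++ l.take (n + 1)) := by
  induction n generalizing l acc with
  | zero =>
    cases l with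
    | nil => simp [List.getD_eq_getElem?_getD, List.getElem?_eq_getElem hja]
    | cons x t =>
      simp [pvStep, pvStep_stuck]
  | succ n ih =>
    cases l with
    | nil => simp [List.getD_eq_getElem?_getD, List.getElem?_eq_getElem hja]
    | cons x t =>
      have hstep : pvStep (11, ((n + 1 : Nat) : Int) + 1, acc) x
          = (11, ((n : Nat) : Int) + 1, acc.set 11 (acc.getD 11 [] ++ [x])) := by
        simp only [pvStep]
        push_cast
        norm_num
        intro h
        exact absurd h (by omega)
      have hja' : 11 < (acc.set 11 (acc.getD 11 [] ++ [x])).length := by simpa using hja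
      rw [List.foldl_cons, hstep, ih t (acc.set 11 (acc.getD 11 [] ++ [x])) hja']
      simp [List.set_set, List.getD_eq_getElem?_getD, hja, List.append_assoc]

-- ===== VERDICT (by name: the statement is the Claim_ definition above) =====
theorem sort_monthly_spec : Claim_equal_sort_monthly := by
  intro l _
  unfold Spec_sort_monthly sort_monthly_alt
  rw [show (pvLens.getD 0 0 : Int) = ((743 : Nat) : Int) + 1 by decide]
  rw [pvFill 0 743 _ _ (by omega) (by simp)]
  rw [show (pvLens.getD 1 0 : Int) = ((671 : Nat) : Int) + 1 by decide]
  rw [pvFill 1 671 _ _ (by omega) (by simp)]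
  rw [show (pvLens.getD 2 0 : Int) = ((743 : Nat) : Int) + 1 by decide]
  rw [pvFill 2 743 _ _ (by omega) (by simp)]
  rw [show (pvLens.getD 3 0 : Int) = ((719 : Nat) : Int) + 1 by decide]
  rw [pvFill 3 719 _ _ (by omega) (by simp)]
  rw [show (pvLens.getD 4 0 : Int) = ((743 : Nat) : Int) + 1 by decide]
  rw [pvFill 4 743 _ _ (by omega) (by simp)]
  rw [show (pvLens.getD 5 0 : Int) = ((719 : Nat) : Int) + 1 by decide]
  rw [pvFill 5 719 _ _ (by omega) (by simp)]
  rw [show (pvLens.getD 6 0 : Int) = ((743 : Nat) : Int) + 1 by decide]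
  rw [pvFill 6 743 _ _ (by omega) (by simp)]
  rw [show (pvLens.getD 7 0 : Int) = ((743 : Nat) : Int) + 1 by decide]
  rw [pvFill 7 743 _ _ (by omega) (by simp)]
  rw [show (pvLens.getD 8 0 : Int) = ((719 : Nat) : Int) + 1 by decide]
  rw [pvFill 8 719 _ _ (by omega) (by simp)]
  rw [show (pvLens.getD 9 0 : Int) = ((743 : Nat) : Int) + 1 by decide]
  rw [pvFill 9 743 _ _ (by omega) (by simp)]
  rw [show (pvLens.getD 10 0 : Int) = ((719 : Nat) : Int) + 1 by decide]
  rw [pvFill 10 719 _ _ (by omega) (by simp)]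
  rw [show (pvLens.getD 11 0 : Int) = ((743 : Nat) : Int) + 1 by decide]
  rw [pvFillLast 743 _ _ (by simp)]
  norm_num [List.replicate, List.getD_eq_getElem?_getD, List.drop_drop]
  unfold sort_monthly
  rw [show PySem.List.pyRange 0 12 1 = [0, 1, 2, 3, 4, 5, 6, 7, 8, 9, 10, 11] from by decide]
  norm_num [PySem.List.slice_toNat]
  exact ⟨rfl, rfl, rfl, rfl, rfl, rfl, rfl, rfl, rfl, rfl, rfl, rfl⟩
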